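-- pv_equiv track=rewrite | github.com/bakhao/Python-Challenges | Hackerrank/ClosestNumbers.py | closestNumbers
-- ===== SOURCE A (Python) =====
-- def closestNumbers(arr):
--     # Write your code here
--     arr.sort()
--     arr_pairs = []
--     minDifference = 1000000000000000
--     for i in range(0, len(arr) - 1):
--         if minDifference > abs(arr[i] - arr[i+1]):
--             minDifference = abs(arr[i] - arr[i+1])
--             arr_pairs.append((arr[i], arr[i+1]))
--     arr_pairs = []
--     for i in range(len(arr) - 1):
--         if abs(arr[i] - arr[i + 1]) == minDifference:
--             arr_pairs.extend([arr[i], arr[i + 1]])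
--     return arr_pairs
-- ===== SOURCE B (Python) =====
-- def closestNumbers(arr):
--     # Group adjacent sorted pairs by their difference, then take the minimal key.
--     # Sorts arr in place, like the original.
--     arr.sort()
--     groups = {}
--     for a, b in zip(arr, arr[1:]):
--         groups.setdefault(abs(a - b), []).extend([a, b])
--     return groups[min(groups)] if groups else []
-- ===== Notes on version B (the rewrite author's own statement) =====
-- stated objective: alternative
-- what changed: Replaces the two-pass running-minimum-then-rescan with a single pass that groups each adjacent pair under its difference in a dict and returns the group of the minimal key.
import Mathlib
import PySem

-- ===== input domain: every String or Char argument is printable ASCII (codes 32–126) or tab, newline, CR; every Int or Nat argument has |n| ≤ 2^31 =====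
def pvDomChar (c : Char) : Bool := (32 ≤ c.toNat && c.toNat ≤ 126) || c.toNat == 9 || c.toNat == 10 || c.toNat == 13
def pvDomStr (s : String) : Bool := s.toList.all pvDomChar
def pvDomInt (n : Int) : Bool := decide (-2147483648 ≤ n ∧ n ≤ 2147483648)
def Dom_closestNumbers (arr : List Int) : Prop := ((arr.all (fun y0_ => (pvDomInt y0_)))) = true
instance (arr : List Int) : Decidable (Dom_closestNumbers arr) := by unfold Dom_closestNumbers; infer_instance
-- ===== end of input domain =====

-- Return-value equivalence only: both Pythons sort `arr` in place (A via arr.sort(), B likewise);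
-- B groups adjacent sorted pairs by their difference in a dict and returns the minimal key's group.


-- ===== PORT A =====
-- first loop: running minimum over adjacent differences (the appended tuples are discarded by A)
def cnLoop1 : List Int → Int → List (Int × Int) → Int × List (Int × Int)
  | a :: b :: t, m, ps =>
      if m > |a - b| then cnLoop1 (b :: t) |a - b| (ps ++ [(a, b)])
      else cnLoop1 (b :: t) m ps
  | _, m, ps => (m, ps)

-- second loop: collect every adjacent pair at the minimal difference
def cnLoop2 : List Int → Int → List Int → List Int
  | a :: b :: t, m, out =>
      if |a - b| = m then cnLoop2 (b :: t) m (out ++ [a, b])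
      else cnLoop2 (b :: t) m out
  | _, _, out => out

def closestNumbers (arr : List Int) : List Int :=
  let s := PySem.List.sorted arr (fun x => x) false
  let r := cnLoop1 s 1000000000000000 []
  cnLoop2 s r.1 []

-- ===== PORT B =====
-- groups.setdefault(abs(a-b), []).extend([a, b]) over zip(arr, arr[1:])
def cnBuild (ps : List (Int × Int)) : PySem.Dict Int (List Int) :=
  ps.foldl (fun g p => g.modify (|p.1 - p.2|) [] (· ++ [p.1, p.2])) PySem.Dict.empty

def closestNumbers_alt (arr : List Int) : List Int :=
  let s := PySem.List.sorted arr (fun x => x) false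
  let g := cnBuild (s.zip s.tail)
  match PySem.List.min? g.keys (fun x => x) with
  | some m => g.getD m []
  | none => []

-- ===== PRECONDITION & SPEC =====
def Spec_closestNumbers (arr : List Int) (out : List Int) : Prop := out = closestNumbers_alt arr
instance (arr : List Int) (out : List Int) : Decidable (Spec_closestNumbers arr out) := by unfold Spec_closestNumbers; infer_instance

-- ===== CLAIM (what is proved, stated in full; the proofs are below) =====
def Claim_equal_closestNumbers : Prop := ∀ (arr : List Int), Dom_closestNumbers arr → Spec_closestNumbers arr (closestNumbers arr)

-- ===== LEMMAS AND PROOFS =====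

-- A's first loop computes a running minimum over the adjacent pairs
theorem cnLoop1_fst (l : List Int) :
    ∀ (m : Int) (ps : List (Int × Int)),
      (cnLoop1 l m ps).1 =
        (l.zip l.tail).foldl (fun m p => if m > |p.1 - p.2| then |p.1 - p.2| else m) m := by
  induction l with
  | nil => intro m ps; simp [cnLoop1]
  | cons a t ih =>
      intro m ps
      cases t with
      | nil => simp [cnLoop1]
      | cons b t' =>
          simp only [cnLoop1, List.tail_cons, List.zip_cons_cons, List.foldl_cons]
          split_ifs with h <;> simp [ih]

-- running-minimum characterization
theorem foldl_runmin (ps : List (Int × Int)) :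
    ∀ (m : Int),
      ((ps.foldl (fun m p => if m > |p.1 - p.2| then |p.1 - p.2| else m) m = m ∨
        ∃ p ∈ ps, ps.foldl (fun m p => if m > |p.1 - p.2| then |p.1 - p.2| else m) m = |p.1 - p.2|) ∧
       ps.foldl (fun m p => if m > |p.1 - p.2| then |p.1 - p.2| else m) m ≤ m ∧
       ∀ p ∈ ps, ps.foldl (fun m p => if m > |p.1 - p.2| then |p.1 - p.2| else m) m ≤ |p.1 - p.2|) := by
  induction ps with
  | nil => intro m; simp
  | cons q t ih =>
      intro m
      simp only [List.foldl_cons]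
      by_cases h : m > |q.1 - q.2|
      · simp only [if_pos h]
        obtain ⟨h1, h2, h3⟩ := ih (|q.1 - q.2|)
        refine ⟨?_, by omega, ?_⟩
        · rcases h1 with h1 | ⟨p, hp, he⟩
          · exact Or.inr ⟨q, by simp, h1⟩
          · exact Or.inr ⟨p, by simp [hp], he⟩
        · intro p hp
          rcases List.mem_cons.mp hp with rfl | hp
          · omega
          · exact h3 p hp
      · simp only [if_neg h]
        obtain ⟨h1, h2, h3⟩ := ih m
        refine ⟨?_, h2, ?_⟩
        · rcases h1 with h1 | ⟨p, hp, he⟩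
          · exact Or.inl h1
          · exact Or.inr ⟨p, by simp [hp], he⟩
        · intro p hp
          rcases List.mem_cons.mp hp with rfl | hp
          · omega
          · exact h3 p hp

-- A's second loop collects the matching pairs in order
theorem cnLoop2_eq (l : List Int) :
    ∀ (m : Int) (out : List Int),
      cnLoop2 l m out =
        out ++ (l.zip l.tail).flatMap (fun p => if |p.1 - p.2| = m then [p.1, p.2] else []) := by
  induction l with
  | nil => intro m out; simp [cnLoop2]
  | cons a t ih =>
      intro m out
      cases t with
      | nil => simp [cnLoop2]
      | cons b t' =>
          simp only [cnLoop2, List.tail_cons, List.zip_cons_cons, List.flatMap_cons]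
          split_ifs with h <;> simp [ih]

-- B's dict lookup is the in-order concatenation of the matching pairs
theorem cnBuild_getD (ps : List (Int × Int)) :
    ∀ (g : PySem.Dict Int (List Int)) (c : Int),
      (ps.foldl (fun g p => g.modify (|p.1 - p.2|) [] (· ++ [p.1, p.2])) g).getD c [] =
        g.getD c [] ++ ps.flatMap (fun p => if |p.1 - p.2| = c then [p.1, p.2] else []) := by
  induction ps with
  | nil => intro g c; simp
  | cons q t ih =>
      intro g c
      simp only [List.foldl_cons, List.flatMap_cons, ih, PySem.Dict.getD_modify]
      by_cases h : c = |q.1 - q.2|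
      · simp [h]
      · have h' : ¬ |q.1 - q.2| = c := fun hh => h hh.symm
        simp [h, h']

-- B's dict keys are exactly the occurring differences
theorem cnBuild_keys (ps : List (Int × Int)) (c : Int) :
    c ∈ (cnBuild ps).keys ↔ c ∈ ps.map (fun p => |p.1 - p.2|) := by
  unfold cnBuild
  rw [PySem.Dict.keys_foldl_modify_key]
  simp [PySem.Set.mem_update, PySem.Dict.keys_empty]

-- core equality on the sorted list
theorem cn_main (s : List Int)
    (hbound : ∀ p ∈ s.zip s.tail, |p.1 - p.2| < 1000000000000000) :
    cnLoop2 s (cnLoop1 s 1000000000000000 []).1 [] =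
      (match PySem.List.min? (cnBuild (s.zip s.tail)).keys (fun x => x) with
       | some m => (cnBuild (s.zip s.tail)).getD m []
       | none => []) := by
  set ps := s.zip s.tail with hps
  rw [cnLoop1_fst, cnLoop2_eq]
  obtain ⟨hmem, hle, hmin⟩ := foldl_runmin ps 1000000000000000
  set mA := ps.foldl (fun m p => if m > |p.1 - p.2| then |p.1 - p.2| else m) 1000000000000000
    with hmA
  cases hk : PySem.List.min? (cnBuild ps).keys (fun x => x) with
  | none =>
      have hkeys : (cnBuild ps).keys = [] := (PySem.List.min?_eq_none_iff _ _).mp hk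
      have hpsnil : ps = [] := by
        cases hq : ps with
        | nil => rfl
        | cons q t =>
            exfalso
            have : |q.1 - q.2| ∈ (cnBuild ps).keys := by
              rw [cnBuild_keys]; simp [hq]
            simp [hkeys] at this
      rw [← hps, hpsnil]
      rfl
  | some mB =>
      have hmBmem : mB ∈ (cnBuild ps).keys := PySem.List.min?_mem hk
      have hmBmin : ∀ y ∈ (cnBuild ps).keys, mB ≤ y := by
        intro y hy
        exact PySem.List.min?_isMin hk y hy
      obtain ⟨p0, hp0, hp0e⟩ := List.mem_map.mp ((cnBuild_keys ps mB).mp hmBmem)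
      have h1 : mA ≤ mB := by rw [← hp0e]; exact hmin p0 hp0
      have h2 : mB ≤ mA := by
        rcases hmem with h | ⟨p, hp, he⟩
        · exfalso
          have := hmin p0 hp0
          have := hbound p0 hp0
          omega
        · have : |p.1 - p.2| ∈ (cnBuild ps).keys := by
            rw [cnBuild_keys]; exact List.mem_map.mpr ⟨p, hp, rfl⟩
          rw [he]; exact hmBmin _ this
      rw [le_antisymm h1 h2]
      unfold cnBuild
      show _ = (List.foldl (fun g p => g.modify (|p.1 - p.2|) [] (fun x => x ++ [p.1, p.2]))
        PySem.Dict.empty ps).getD mB []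
      rw [cnBuild_getD]
      simp [hps]

-- ===== VERDICT (by name: the statement is the Claim_ definition above) =====
theorem closestNumbers_spec : Claim_equal_closestNumbers := by
  intro arr hdom
  show closestNumbers arr = closestNumbers_alt arr
  have hbound : ∀ p ∈ (PySem.List.sorted arr (fun x => x) false).zip
      (PySem.List.sorted arr (fun x => x) false).tail, |p.1 - p.2| < 1000000000000000 := by
    intro p hp
    obtain ⟨pa, pb⟩ := p
    obtain ⟨h1, h2⟩ := List.of_mem_zip hp
    have h2' : pb ∈ PySem.List.sorted arr (fun x => x) false := List.mem_of_mem_tail h2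
    have hb : ∀ x ∈ PySem.List.sorted arr (fun x => x) false,
        -2147483648 ≤ x ∧ x ≤ 2147483648 := by
      intro x hx
      have hx' : x ∈ arr := (PySem.List.mem_sorted _ _ _ _).mp hx
      have := List.all_eq_true.mp hdom x hx'
      simpa [pvDomInt] using this
    obtain ⟨ha1, ha2⟩ := hb pa h1
    obtain ⟨hb1, hb2⟩ := hb pb h2'
    rw [abs_sub_lt_iff]; omega
  exact cn_main _ hbound
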